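-- pv_equiv track=rewrite | github.com/ihsanabdulhakim/spotifyai-reviewerLLM | backend.py | get_oldest_version
-- ===== SOURCE A (Python) =====
-- def get_oldest_version(context_list):
--     # Initialize a variable to hold the oldest version found
--     oldest_version = None
--
--     # Function to convert version string to a tuple of integers for comparison
--     def version_key(version):
--         try:
--             return tuple(map(int, version.split('.')))
--         except ValueError:
--             return (float('inf'),)  # Return a tuple that will sort to the end
--
--     # Iterate through each item in the context_list
--     for item in context_list:
--         version = item.get('author_app_version')  # Use get() to avoid KeyError
--
--         # Check if the version is valid
--         if version:
--             # Update the oldest version if it is not set or is older than the current oldest_version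
--             if oldest_version is None or version_key(version) < version_key(oldest_version):
--                 oldest_version = version
--
--     return oldest_version
-- ===== SOURCE B (Python) =====
-- def get_oldest_version(context_list):
--     # Collect the truthy versions, stable-sort them by parsed key, return the first.
--     # Stable sort keeps the first occurrence among equal keys, matching A's
--     # strict '<' keep-first update; invalid versions sort after all valid ones.
--     def version_key(version):
--         try:
--             return (0, tuple(map(int, version.split('.'))))
--         except ValueError:
--             return (1, ())
--
--     versions = [item.get('author_app_version') for item in context_list]
--     versions = [v for v in versions if v]
--     versions.sort(key=version_key)
--     return versions[0] if versions else None
-- ===== Notes on version B (the rewrite author's own statement) =====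
-- stated objective: alternative
-- what changed: Replaced A's single-pass running-minimum scan (None sentinel, strict '<' update, inf-tuple trick) by staged passes: collect the truthy versions, stable-sort the list by the parsed version key, and return its first element (or None if empty); stability preserves A's keep-first tie-breaking.
import Mathlib
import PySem

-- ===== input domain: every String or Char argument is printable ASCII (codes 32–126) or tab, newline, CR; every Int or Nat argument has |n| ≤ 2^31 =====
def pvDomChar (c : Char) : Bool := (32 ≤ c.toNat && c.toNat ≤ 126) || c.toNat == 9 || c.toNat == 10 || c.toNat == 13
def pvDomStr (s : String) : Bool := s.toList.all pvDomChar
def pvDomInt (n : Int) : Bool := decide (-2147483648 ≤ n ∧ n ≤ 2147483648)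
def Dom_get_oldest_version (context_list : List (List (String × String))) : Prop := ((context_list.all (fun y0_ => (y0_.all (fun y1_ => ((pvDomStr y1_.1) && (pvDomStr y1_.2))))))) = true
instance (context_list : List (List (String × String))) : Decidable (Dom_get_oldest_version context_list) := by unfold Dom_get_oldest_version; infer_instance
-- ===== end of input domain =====

-- B replaces A's running-minimum scan by staged passes: collect the truthy versions,
-- stable-sort them by the parsed version key, return the first element (alternative; same result).

-- ===== PORT A =====
-- tuple(map(int, version.split('.'))): some list of ints, or none on the first ValueError
def pvParseInts : List String → Option (List Int)
  | [] => some []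
  | s :: rest =>
    match PySem.Int.ofStr? s, pvParseInts rest with
    | some n, some t => some (n :: t)
    | _, _ => none

-- A's version_key: none models the ValueError fallback (float('inf'),)
def pyVersionKey (version : String) : Option (List Int) :=
  pvParseInts (((PySem.Str.split? version ".").getD []))

-- Python '<' on the keys, ported by hand (exact): two int tuples compare lexicographically
-- (Lean's List Int '<' is that order); any int tuple < (inf,); (inf,) is < nothing here.
def pyKeyLt (a b : Option (List Int)) : Bool :=
  match a, b with
  | some xs, some ys => decide (xs < ys)
  | some _, none => true
  | none, _ => false

def get_oldest_version (context_list : List (List (String × String))) : Option String :=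
  context_list.foldl
    (fun oldest item =>
      match List.lookup "author_app_version" item with
      | some version =>
        if version ≠ "" then
          match oldest with
          | none => some version
          | some m => if pyKeyLt (pyVersionKey version) (pyVersionKey m) then some version else some m
        else oldest
      | none => oldest)
    none

-- ===== PORT B =====
-- B's version_key: (0, ints) for a parsable version, (1, ()) for the ValueError case
def version_key_alt (version : String) : Nat × List Int :=
  match pvParseInts (((PySem.Str.split? version ".").getD [])) with
  | some xs => (0, xs)
  | none => (1, [])

def get_oldest_version_alt (context_list : List (List (String × String))) : Option String :=
  let versions := context_list.map (fun item => List.lookup "author_app_version" item)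
  let valid := versions.filterMap (fun v =>
    match v with
    | some s => if s ≠ "" then some s else none
    | none => none)
  (PySem.List.sorted2 valid (fun v => (version_key_alt v).1) (fun v => (version_key_alt v).2) false).head?

-- ===== PRECONDITION & SPEC =====
def Spec_get_oldest_version (context_list : List (List (String × String))) (out : Option String) : Prop := out = get_oldest_version_alt context_list
instance (context_list : List (List (String × String))) (out : Option String) : Decidable (Spec_get_oldest_version context_list out) := by unfold Spec_get_oldest_version; infer_instance

-- ===== CLAIM (what is proved, stated in full; the proofs are below) =====
def Claim_equal_get_oldest_version : Prop := ∀ (context_list : List (List (String × String))), Dom_get_oldest_version context_list → Spec_get_oldest_version context_list (get_oldest_version context_list)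

-- ===== LEMMAS AND PROOFS =====

-- A's comparison of the two keys coincides with sorted2's lexicographic pair comparison of B's keys
theorem pyKeyLt_eq_pair (x m : String) :
    pyKeyLt (pyVersionKey x) (pyVersionKey m)
      = (decide ((version_key_alt x).1 < (version_key_alt m).1)
         || !decide ((version_key_alt m).1 < (version_key_alt x).1)
            && decide ((version_key_alt x).2 < (version_key_alt m).2)) := by
  unfold pyVersionKey version_key_alt
  rcases hx : pvParseInts (((PySem.Str.split? x ".").getD [])) with _ | xs <;>
    rcases hm : pvParseInts (((PySem.Str.split? m ".").getD [])) with _ | ys <;>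
      simp [pyKeyLt]

-- head of one insertion step = the keep-first-minimum step on heads
theorem head_insertBy {α : Type} (before : α → α → Bool) (x : α) (acc : List α) :
    (PySem.List.insertBy before x acc).head?
      = (match acc.head? with
         | none => some x
         | some m => if before x m then some x else some m) := by
  cases acc with
  | nil => rfl
  | cons y ys =>
    by_cases h : before x y = true <;> simp [PySem.List.insertBy, h]

-- head of the insertion-sort fold = the running keep-first-minimum fold
theorem head_foldl_insertBy {α : Type} (before : α → α → Bool) (xs : List α) (acc : List α) :
    (xs.foldl (fun acc x => PySem.List.insertBy before x acc) acc).head?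
      = xs.foldl
          (fun o x =>
            match o with
            | none => some x
            | some m => if before x m then some x else some m)
          acc.head? := by
  induction xs generalizing acc with
  | nil => rfl
  | cons x rest ih =>
    rw [List.foldl_cons, List.foldl_cons, ih, head_insertBy]

theorem foldl_A_eq_min_aux (l : List (List (String × String))) (acc : Option String) :
    l.foldl
      (fun oldest item =>
        match List.lookup "author_app_version" item with
        | some version =>
          if version ≠ "" then
            match oldest with
            | none => some version
            | some m => if pyKeyLt (pyVersionKey version) (pyVersionKey m) then some version else some m
          else oldest
        | none => oldest)
      acc
    = (l.filterMap (fun item =>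
        match List.lookup "author_app_version" item with
        | some s => if s ≠ "" then some s else none
        | none => none)).foldl
        (fun o x =>
          match o with
          | none => some x
          | some m =>
            if (decide ((version_key_alt x).1 < (version_key_alt m).1)
                || !decide ((version_key_alt m).1 < (version_key_alt x).1)
                   && decide ((version_key_alt x).2 < (version_key_alt m).2))
            then some x else some m)
        acc := by
  induction l generalizing acc with
  | nil => rfl
  | cons item rest ih =>
    rw [List.foldl_cons, List.filterMap_cons]
    rcases hv : List.lookup "author_app_version" item with _ | v
    · exact ih acc
    · simp only []
      by_cases hne : v = ""
      · rw [if_neg (fun h => h hne), if_neg (fun h => h hne)]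
        exact ih acc
      · simp only [ne_eq, hne, not_false_eq_true, if_true]
        rw [ih]
        have hstep : (match acc with
            | none => some v
            | some m => if pyKeyLt (pyVersionKey v) (pyVersionKey m) then some v else some m)
            = (match acc with
            | none => some v
            | some m =>
              if (decide ((version_key_alt v).1 < (version_key_alt m).1)
                  || !decide ((version_key_alt m).1 < (version_key_alt v).1)
                     && decide ((version_key_alt v).2 < (version_key_alt m).2))
              then some v else some m : Option String) := by
          rcases acc with _ | m
          · rfl
          · simp [pyKeyLt_eq_pair]
        rw [hstep]
        rfl

-- ===== VERDICT (by name: the statement is the Claim_ definition above) =====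
theorem get_oldest_version_spec : Claim_equal_get_oldest_version := by
  intro context_list _
  unfold Spec_get_oldest_version get_oldest_version get_oldest_version_alt PySem.List.sorted2
  rw [foldl_A_eq_min_aux, head_foldl_insertBy]
  simp only [List.filterMap_map, Function.comp, List.head?_nil, if_neg (by decide : ¬ (false = true))]
  congr 1
  funext o x
  rcases o with _ | m
  · rfl
  · by_cases h : (decide ((version_key_alt x).1 < (version_key_alt m).1)
        || !decide ((version_key_alt m).1 < (version_key_alt x).1)
           && decide ((version_key_alt x).2 < (version_key_alt m).2)) = true
    · simp only [h, if_true]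
    · simp only [h]
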